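-- pv_equiv track=rewrite | github.com/yangnicejin/DTSFM | DTSFM_main.py | get_m_hop_neighbors
-- ===== SOURCE A (Python) =====
-- def get_m_hop_neighbors(entity, adjacency, m):
--     visited = set()
--     current_level = set([entity])
--     for _ in range(m):
--         next_level = set()
--         for node in current_level:
--             for neighbor in adjacency[node]:
--                 if neighbor not in visited:
--                     next_level.add(neighbor)
--         visited.update(current_level)
--         current_level = next_level
--     return visited
-- ===== SOURCE B (Python) =====
-- def get_m_hop_neighbors(entity, adjacency, m):
--     if m <= 0:
--         return set()
--     seen = {entity}
--     queue = [(entity, 0)]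
--     i = 0
--     while i < len(queue):
--         node, d = queue[i]
--         i += 1
--         if d < m - 1:
--             for nb in adjacency[node]:
--                 if nb not in seen:
--                     seen.add(nb)
--                     queue.append((nb, d + 1))
--     return seen
-- ===== Notes on version B (the rewrite author's own statement) =====
-- stated objective: alternative
-- what changed: Replaces the fixed m-round two-set level iteration (which rescans already-visited 'echo' nodes every round and keeps looping even after the reachable set stabilises) by a single-pass queue BFS with depth tags and one seen-set that visits each node at most once and stops when the queue empties.
-- outside the precondition, e.g. on get_m_hop_neighbors(0, {0: [1], 1: [2]}, 2): A returns {0, 1}, B returns {0, 1}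
import Mathlib
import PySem

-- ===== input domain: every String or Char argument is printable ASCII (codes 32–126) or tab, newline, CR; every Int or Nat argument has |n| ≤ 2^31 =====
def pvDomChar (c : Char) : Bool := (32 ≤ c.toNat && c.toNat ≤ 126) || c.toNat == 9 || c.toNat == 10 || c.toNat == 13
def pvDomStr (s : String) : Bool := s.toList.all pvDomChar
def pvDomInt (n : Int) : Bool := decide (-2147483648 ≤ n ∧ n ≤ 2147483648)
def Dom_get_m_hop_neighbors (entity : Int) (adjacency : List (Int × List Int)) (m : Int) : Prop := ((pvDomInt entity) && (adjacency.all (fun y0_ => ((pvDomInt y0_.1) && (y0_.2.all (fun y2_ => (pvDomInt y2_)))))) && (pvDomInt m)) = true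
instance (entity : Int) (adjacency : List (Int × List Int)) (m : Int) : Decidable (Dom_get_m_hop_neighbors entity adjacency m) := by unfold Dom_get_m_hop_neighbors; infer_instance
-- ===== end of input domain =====

-- B replaces A's fixed m-round two-set level iteration by a single-pass queue BFS (one seen-set,
-- depth-tagged queue, stops when the queue empties); proved to return the same list on Pre_.

-- ===== PORT A =====
-- Literal transliteration of A: visited/current_level are Python sets (PySem.Set, insertion order);
-- adjacency[node] is ported as PySem.Dict.getD with default [] — exact on Pre_, which excludes the
-- inputs where Python raises KeyError.
def get_m_hop_neighbors (entity : Int) (adjacency : List (Int × List Int)) (m : Int) : List Int :=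
  ((PySem.List.pyRange 0 m 1).foldl
    (fun (st : PySem.Set Int × PySem.Set Int) _ =>
      let next_level : PySem.Set Int :=
        st.2.foldl
          (fun nl node =>
            (PySem.Dict.getD (PySem.Dict.mk adjacency) node []).foldl
              (fun nl2 neighbor =>
                if PySem.Set.contains st.1 neighbor then nl2 else PySem.Set.add nl2 neighbor)
              nl)
          PySem.Set.empty
      (PySem.Set.update st.1 st.2, next_level))
    ((PySem.Set.empty : PySem.Set Int), PySem.Set.ofList [entity])).1

-- ===== PORT B =====
-- Source B's while-loop over the growing queue, consumed from the front. The Nat `fuel` argument only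
-- makes the recursion structurally terminating: each iteration consumes one queue entry, and the
-- number of queue entries ever created equals the number of insertions into `seen`, at most the
-- number of distinct candidate nodes — which is what get_m_hop_neighbors_alt passes as fuel
-- (sufficiency is part of the proof below; the fuel-0 branch is never reached from there).
def pvBfsLoop (adjacency : List (Int × List Int)) (m : Int) :
    Nat → List (Int × Int) → PySem.Set Int → PySem.Set Int
  | 0, _, seen => seen
  | _ + 1, [], seen => seen
  | fuel + 1, (node, d) :: rest, seen =>
    if d < m - 1 then
      let step :=
        (PySem.Dict.getD (PySem.Dict.mk adjacency) node []).foldl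
          (fun (p : PySem.Set Int × List (Int × Int)) nb =>
            if PySem.Set.contains p.1 nb then p else (PySem.Set.add p.1 nb, p.2 ++ [(nb, d + 1)]))
          (seen, [])
      pvBfsLoop adjacency m fuel (rest ++ step.2) step.1
    else pvBfsLoop adjacency m fuel rest seen

-- all distinct nodes that can ever enter `seen` (the fuel bound for the loop above)
def pvW (entity : Int) (adjacency : List (Int × List Int)) : List Int :=
  PySem.List.dedup (entity :: adjacency.flatMap (fun p => p.2))

def get_m_hop_neighbors_alt (entity : Int) (adjacency : List (Int × List Int)) (m : Int) : List Int :=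
  if m ≤ 0 then []
  else pvBfsLoop adjacency m (pvW entity adjacency).length [(entity, 0)] (PySem.Set.ofList [entity])

-- ===== PRECONDITION & SPEC =====
-- Python A raises KeyError when it looks up a node missing from `adjacency` (any node within m-1
-- hops of `entity`). For m ≤ 0 A indexes nothing, and for m = 1 it indexes exactly `entity`, so
-- there Pre_ is exact. For m ≥ 2 the raising set is a reachability fixpoint, not a closed form, so
-- Pre_ uses the slightly stronger (declared narrowing) closed-form condition that every listed
-- neighbor is also a key; that excludes some m ≥ 2 inputs on which A does return (only because
-- every unkeyed node happens to lie beyond the explored depth) — on those both programs agree anyway.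
def Pre_get_m_hop_neighbors (entity : Int) (adjacency : List (Int × List Int)) (m : Int) : Prop :=
  m ≤ 0 ∨ (entity ∈ adjacency.map Prod.fst ∧
    (m = 1 ∨ ∀ p ∈ adjacency, ∀ v ∈ p.2, v ∈ adjacency.map Prod.fst))
instance (entity : Int) (adjacency : List (Int × List Int)) (m : Int) :
    Decidable (Pre_get_m_hop_neighbors entity adjacency m) := by
  unfold Pre_get_m_hop_neighbors; infer_instance

def pvWitness_get_m_hop_neighbors : Int × (List (Int × List Int)) × Int :=
  (0, [(0, [1]), (1, [0, 1])], 2)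

def Spec_get_m_hop_neighbors (entity : Int) (adjacency : List (Int × List Int)) (m : Int) (out : List Int) : Prop := out = get_m_hop_neighbors_alt entity adjacency m
instance (entity : Int) (adjacency : List (Int × List Int)) (m : Int) (out : List Int) : Decidable (Spec_get_m_hop_neighbors entity adjacency m out) := by unfold Spec_get_m_hop_neighbors; infer_instance

-- ===== CLAIM (what is proved, stated in full; the proofs are below) =====
def Claim_equal_get_m_hop_neighbors : Prop := ∀ (entity : Int) (adjacency : List (Int × List Int)) (m : Int), Dom_get_m_hop_neighbors entity adjacency m → Pre_get_m_hop_neighbors entity adjacency m → Spec_get_m_hop_neighbors entity adjacency m (get_m_hop_neighbors entity adjacency m)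

-- ===== LEMMAS AND PROOFS =====

-- Basic bridges -------------------------------------------------------------

theorem pv_set_contains (s : List Int) (x : Int) : PySem.Set.contains s x = s.contains x := rfl

theorem pv_set_add (s : List Int) (x : Int) :
    PySem.Set.add s x = if s.contains x = true then s else s ++ [x] := rfl

theorem pv_contains_iff (l : List Int) (x : Int) : l.contains x = true ↔ x ∈ l := by
  simp


theorem pv_mem_of_contains {l : List Int} {x : Int} (h : l.contains x = true) : x ∈ l :=
  (pv_contains_iff l x).mp h

theorem pv_contains_of_mem {l : List Int} {x : Int} (h : x ∈ l) : l.contains x = true :=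
  (pv_contains_iff l x).mpr h

theorem pv_not_mem_of_not_contains {l : List Int} {x : Int} (h : ¬ l.contains x = true) : x ∉ l :=
  fun hm => h (pv_contains_of_mem hm)

theorem pv_nodup_snoc {l : List Int} {x : Int} (h1 : l.Nodup) (h2 : x ∉ l) : (l ++ [x]).Nodup := by
  rw [List.nodup_append]
  refine ⟨h1, List.nodup_singleton x, ?_⟩
  intro a ha b hb
  rw [List.mem_singleton] at hb
  subst hb
  exact fun heq => h2 (heq ▸ ha)

theorem pv_foldl_const {α β : Type} (l : List α) (f : β → β) (i : β) :
    l.foldl (fun st _ => f st) i = f^[l.length] i := by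
  induction l generalizing i with
  | nil => rfl
  | cons a l ih => simp [List.foldl_cons, ih, Function.iterate_succ_apply]

theorem pv_mem_of_filter_eq {sk f : List Int} {l : List Int}
    (h : l.filter (fun z => !sk.contains z) = f) : ∀ x ∈ l, x ∈ sk ∨ x ∈ f := by
  intro x hx
  by_cases hc : sk.contains x = true
  · exact Or.inl ((pv_contains_iff sk x).mp hc)
  · refine Or.inr ?_
    rw [← h]
    exact List.mem_filter.mpr ⟨hx, by simp [pv_not_mem_of_not_contains hc]⟩

-- The shared one-node "insert the unseen" fold ------------------------------

def pvAddR (r : List Int × List Int) (nb : Int) : List Int × List Int :=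
  if r.1.contains nb then r else (r.1 ++ [nb], r.2 ++ [nb])

def pvRefNode (g : Int → List Int) (r : List Int × List Int) (x : Int) : List Int × List Int :=
  (g x).foldl pvAddR r

def pvRefStep (g : Int → List Int) (p : List Int × List Int) : List Int × List Int :=
  p.2.foldl (pvRefNode g) (p.1, [])

def pvRef (g : Int → List Int) (e : Int) (k : ℕ) : List Int × List Int :=
  (pvRefStep g)^[k] ([e], [e])

def pvAdj (adjacency : List (Int × List Int)) : Int → List Int :=
  fun node => PySem.Dict.getD (PySem.Dict.mk adjacency) node []

theorem pv_addR_shift : ∀ (ns s t : List Int),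
    ns.foldl pvAddR (s, t)
      = ((ns.foldl pvAddR (s, [])).1, t ++ (ns.foldl pvAddR (s, [])).2) := by
  intro ns
  induction ns with
  | nil => intro s t; simp
  | cons nb ns ih =>
    intro s t
    by_cases h : nb ∈ s
    · have h1 : pvAddR (s, t) nb = (s, t) := by simp [pvAddR, h]
      have h2 : pvAddR (s, ([] : List Int)) nb = (s, []) := by simp [pvAddR, h]
      simp only [List.foldl_cons, h1, h2]
      exact ih s t
    · have h1 : pvAddR (s, t) nb = (s ++ [nb], t ++ [nb]) := by simp [pvAddR, h]
      have h2 : pvAddR (s, ([] : List Int)) nb = (s ++ [nb], [nb]) := by simp [pvAddR, h]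
      simp only [List.foldl_cons, h1, h2]
      rw [ih (s ++ [nb]) (t ++ [nb]), ih (s ++ [nb]) [nb]]
      simp

theorem pv_addR_spec : ∀ (ns s : List Int), ∃ T : List Int,
    ns.foldl pvAddR (s, []) = (s ++ T, T) ∧ (∀ y ∈ T, y ∈ ns) ∧
    (s.Nodup → (s ++ T).Nodup) ∧ (∀ y ∈ ns, y ∈ s ++ T) := by
  intro ns
  induction ns with
  | nil => intro s; exact ⟨[], by simp⟩
  | cons nb ns ih =>
    intro s
    by_cases h : nb ∈ s
    · obtain ⟨T, h1, h2, h3, h4⟩ := ih s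
      have hstep : pvAddR (s, ([] : List Int)) nb = (s, []) := by simp [pvAddR, h]
      refine ⟨T, ?_, ?_, h3, ?_⟩
      · simp only [List.foldl_cons, hstep]; exact h1
      · exact fun y hy => List.mem_cons_of_mem _ (h2 y hy)
      · intro y hy
        rcases List.mem_cons.mp hy with rfl | hy'
        · exact List.mem_append.mpr (Or.inl h)
        · exact h4 y hy'
    · obtain ⟨T, h1, h2, h3, h4⟩ := ih (s ++ [nb])
      have hstep : pvAddR (s, ([] : List Int)) nb = (s ++ [nb], [nb]) := by simp [pvAddR, h]
      have hnmem : nb ∉ s := h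
      refine ⟨nb :: T, ?_, ?_, ?_, ?_⟩
      · simp only [List.foldl_cons, hstep]
        rw [pv_addR_shift ns (s ++ [nb]) [nb], h1]
        simp
      · intro y hy
        rcases List.mem_cons.mp hy with rfl | hy'
        · exact List.mem_cons_self ..
        · exact List.mem_cons_of_mem _ (h2 y hy')
      · intro hnd
        have hnd1 : (s ++ [nb]).Nodup := pv_nodup_snoc hnd hnmem
        have := h3 hnd1
        simpa [List.append_assoc] using this
      · intro y hy
        rcases List.mem_cons.mp hy with rfl | hy'
        · have : y ∈ (s ++ [y]) ++ T := List.mem_append.mpr (Or.inl (by simp))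
          simpa [List.append_assoc] using this
        · have := h4 y hy'
          simpa [List.append_assoc] using this

theorem pv_refNode_shift (g : Int → List Int) : ∀ (D s t : List Int),
    D.foldl (pvRefNode g) (s, t)
      = ((D.foldl (pvRefNode g) (s, [])).1, t ++ (D.foldl (pvRefNode g) (s, [])).2) := by
  intro D
  induction D with
  | nil => intro s t; simp
  | cons x D ih =>
    intro s t
    obtain ⟨T, hT, _, _, _⟩ := pv_addR_spec (g x) s
    have hL : pvRefNode g (s, t) x = (s ++ T, t ++ T) := by
      unfold pvRefNode
      rw [pv_addR_shift (g x) s t, hT]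
    have hR : pvRefNode g (s, ([] : List Int)) x = (s ++ T, T) := by
      unfold pvRefNode
      rw [hT]
    simp only [List.foldl_cons, hL, hR]
    rw [ih (s ++ T) (t ++ T), ih (s ++ T) T]
    simp

theorem pv_refNode_spec (g : Int → List Int) : ∀ (D s : List Int), ∃ T : List Int,
    D.foldl (pvRefNode g) (s, []) = (s ++ T, T) ∧ (∀ y ∈ T, ∃ x ∈ D, y ∈ g x) ∧
    (s.Nodup → (s ++ T).Nodup) ∧ (∀ x ∈ D, ∀ y ∈ g x, y ∈ s ++ T) := by
  intro D
  induction D with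
  | nil => intro s; exact ⟨[], by simp⟩
  | cons x D ih =>
    intro s
    obtain ⟨T1, a1, a2, a3, a4⟩ := pv_addR_spec (g x) s
    obtain ⟨T2, b1, b2, b3, b4⟩ := ih (s ++ T1)
    have hstep : pvRefNode g (s, ([] : List Int)) x = (s ++ T1, T1) := by
      unfold pvRefNode
      rw [a1]
    refine ⟨T1 ++ T2, ?_, ?_, ?_, ?_⟩
    · simp only [List.foldl_cons, hstep]
      rw [pv_refNode_shift g D (s ++ T1) T1, b1]
      simp
    · intro y hy
      rcases List.mem_append.mp hy with hy1 | hy2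
      · exact ⟨x, List.mem_cons_self .., a2 y hy1⟩
      · obtain ⟨z, hz, hzy⟩ := b2 y hy2
        exact ⟨z, List.mem_cons_of_mem _ hz, hzy⟩
    · intro hnd
      have := b3 (a3 hnd)
      simpa [List.append_assoc] using this
    · intro z hz y hy
      rcases List.mem_cons.mp hz with rfl | hz'
      · have h1 : y ∈ s ++ T1 := a4 y hy
        have h2 : y ∈ (s ++ T1) ++ T2 := List.mem_append.mpr (Or.inl h1)
        simpa [List.append_assoc] using h2
      · have := b4 z hz' y hy
        simpa [List.append_assoc] using this

-- Reference level iteration: basic facts ------------------------------------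

theorem pv_ref_zero (g : Int → List Int) (e : Int) : pvRef g e 0 = ([e], [e]) := rfl

theorem pv_ref_succ (g : Int → List Int) (e : Int) (k : ℕ) :
    pvRef g e (k + 1) = pvRefStep g (pvRef g e k) := Function.iterate_succ_apply' _ _ _

theorem pv_refStep_spec (g : Int → List Int) (p : List Int × List Int) : ∃ T : List Int,
    pvRefStep g p = (p.1 ++ T, T) ∧ (∀ y ∈ T, ∃ x ∈ p.2, y ∈ g x) ∧
    (p.1.Nodup → (p.1 ++ T).Nodup) ∧ (∀ x ∈ p.2, ∀ y ∈ g x, y ∈ p.1 ++ T) := by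
  obtain ⟨T, h1, h2, h3, h4⟩ := pv_refNode_spec g p.2 p.1
  exact ⟨T, h1, h2, h3, h4⟩

theorem pv_ref_seen_succ (g : Int → List Int) (e : Int) (k : ℕ) :
    (pvRef g e (k + 1)).1 = (pvRef g e k).1 ++ (pvRef g e (k + 1)).2 := by
  obtain ⟨T, h1, _, _, _⟩ := pv_refStep_spec g (pvRef g e k)
  rw [pv_ref_succ, h1]

theorem pv_ref_mono_succ (g : Int → List Int) (e : Int) (k : ℕ) :
    ∀ y ∈ (pvRef g e k).1, y ∈ (pvRef g e (k + 1)).1 := by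
  intro y hy
  rw [pv_ref_seen_succ]
  exact List.mem_append.mpr (Or.inl hy)

theorem pv_ref_front_sub (g : Int → List Int) (e : Int) (k : ℕ) :
    ∀ x ∈ (pvRef g e k).2, x ∈ (pvRef g e k).1 := by
  cases k with
  | zero => simp [pv_ref_zero]
  | succ k =>
    intro x hx
    rw [pv_ref_seen_succ]
    exact List.mem_append.mpr (Or.inr hx)

theorem pv_ref_adj (g : Int → List Int) (e : Int) :
    ∀ k, ∀ x ∈ (pvRef g e k).1, ∀ y ∈ g x, y ∈ (pvRef g e (k + 1)).1 := by
  intro k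
  induction k with
  | zero =>
    intro x hx y hy
    obtain ⟨T, h1, _, _, h4⟩ := pv_refStep_spec g (pvRef g e 0)
    rw [pv_ref_succ, h1]
    have hx0 : x ∈ (pvRef g e 0).2 := by simpa [pv_ref_zero] using hx
    exact h4 x hx0 y hy
  | succ k ih =>
    intro x hx y hy
    rw [pv_ref_seen_succ] at hx
    rcases List.mem_append.mp hx with hx1 | hx2
    · exact pv_ref_mono_succ g e (k + 1) y (ih x hx1 y hy)
    · obtain ⟨T, h1, _, _, h4⟩ := pv_refStep_spec g (pvRef g e (k + 1))
      rw [pv_ref_succ, h1]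
      exact h4 x hx2 y hy

theorem pv_ref_stab (g : Int → List Int) (e : Int) (k : ℕ)
    (h : (pvRef g e k).2 = []) : ∀ j, pvRef g e (k + j) = pvRef g e k := by
  intro j
  induction j with
  | zero => rfl
  | succ j ih =>
    have he : k + (j + 1) = (k + j) + 1 := rfl
    rw [he, pv_ref_succ, ih]
    unfold pvRefStep
    rw [h]
    simp only [List.foldl_nil]
    rw [Prod.ext_iff]
    exact ⟨rfl, h.symm⟩

-- A's one round simulates one reference round --------------------------------

theorem pv_echo_fold (V sk : List Int) : ∀ (ns na : List Int),
    (∀ y ∈ ns, y ∈ sk) → na.Nodup →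
    (ns.foldl (fun nl2 nb => if PySem.Set.contains V nb then nl2 else PySem.Set.add nl2 nb) na).Nodup
    ∧ (ns.foldl (fun nl2 nb => if PySem.Set.contains V nb then nl2 else PySem.Set.add nl2 nb) na).filter
        (fun z => !sk.contains z)
      = na.filter (fun z => !sk.contains z) := by
  intro ns
  induction ns with
  | nil => intro na _ hnd; exact ⟨hnd, rfl⟩
  | cons nb ns ih =>
    intro na hsub hnd
    have hnb : nb ∈ sk := hsub nb (List.mem_cons_self ..)
    have hsub' : ∀ y ∈ ns, y ∈ sk := fun y hy => hsub y (List.mem_cons_of_mem _ hy)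
    by_cases h1 : PySem.Set.contains V nb = true
    · simp only [List.foldl_cons, if_pos h1]
      exact ih na hsub' hnd
    · simp only [List.foldl_cons, if_neg h1]
      by_cases h2 : na.contains nb = true
      · rw [pv_set_add, if_pos h2]
        exact ih na hsub' hnd
      · rw [pv_set_add, if_neg h2]
        have hnmem : nb ∉ na := pv_not_mem_of_not_contains h2
        have hnd' : (na ++ [nb]).Nodup := pv_nodup_snoc hnd hnmem
        obtain ⟨c1, c2⟩ := ih (na ++ [nb]) hsub' hnd'
        refine ⟨c1, ?_⟩
        rw [c2, List.filter_append]
        simp [hnb]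

theorem pv_new_fold (V sk : List Int) (hVsk : ∀ x ∈ V, x ∈ sk) : ∀ (ns na rf : List Int),
    na.Nodup → na.filter (fun z => !sk.contains z) = rf →
    (ns.foldl (fun nl2 nb => if PySem.Set.contains V nb then nl2 else PySem.Set.add nl2 nb) na).Nodup
    ∧ (ns.foldl (fun nl2 nb => if PySem.Set.contains V nb then nl2 else PySem.Set.add nl2 nb) na).filter
        (fun z => !sk.contains z)
      = (ns.foldl pvAddR (sk ++ rf, rf)).2
    ∧ (ns.foldl pvAddR (sk ++ rf, rf)).1 = sk ++ (ns.foldl pvAddR (sk ++ rf, rf)).2 := by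
  intro ns
  induction ns with
  | nil => intro na rf h1 h2; exact ⟨h1, h2, rfl⟩
  | cons nb ns ih =>
    intro na rf h1 h2
    by_cases hsk : nb ∈ sk
    · -- reference side skips nb
      have hmm : nb ∈ sk ++ rf := List.mem_append.mpr (Or.inl hsk)
      have hAdd : pvAddR (sk ++ rf, rf) nb = (sk ++ rf, rf) := by simp [pvAddR, hmm]
      by_cases h1a : PySem.Set.contains V nb = true
      · simp only [List.foldl_cons, if_pos h1a, hAdd]
        exact ih na rf h1 h2
      · simp only [List.foldl_cons, if_neg h1a, hAdd]
        by_cases h2a : na.contains nb = true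
        · rw [pv_set_add, if_pos h2a]
          exact ih na rf h1 h2
        · rw [pv_set_add, if_neg h2a]
          have hnmem : nb ∉ na := pv_not_mem_of_not_contains h2a
          have h1' : (na ++ [nb]).Nodup := pv_nodup_snoc h1 hnmem
          have h2' : (na ++ [nb]).filter (fun z => !sk.contains z) = rf := by
            rw [List.filter_append, h2]
            simp [hsk]
          exact ih (na ++ [nb]) rf h1' h2'
    · -- nb is genuinely new for the reference iff it is new for A
      have hnbV : ¬ PySem.Set.contains V nb = true := by
        rw [pv_set_contains]
        intro hc
        exact hsk (hVsk nb (pv_mem_of_contains hc))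
      have hskc : ¬ sk.contains nb = true := fun hc => hsk (pv_mem_of_contains hc)
      have hiff : nb ∈ na ↔ nb ∈ rf := by
        constructor
        · intro hm
          rw [← h2]
          exact List.mem_filter.mpr ⟨hm, by simp [hsk]⟩
        · intro hm
          rw [← h2] at hm
          exact (List.mem_filter.mp hm).1
      by_cases hna : nb ∈ na
      · -- both skip
        have hmm : nb ∈ sk ++ rf := List.mem_append.mpr (Or.inr (hiff.mp hna))
        have hAdd : pvAddR (sk ++ rf, rf) nb = (sk ++ rf, rf) := by simp [pvAddR, hmm]
        have hnac : na.contains nb = true := pv_contains_of_mem hna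
        simp only [List.foldl_cons, if_neg hnbV, hAdd]
        rw [pv_set_add, if_pos hnac]
        exact ih na rf h1 h2
      · -- both add
        have hnrf : nb ∉ rf := fun hm => hna (hiff.mpr hm)
        have hmm : nb ∉ sk ++ rf := by
          intro hc
          rcases List.mem_append.mp hc with hm | hm
          · exact hsk hm
          · exact hnrf hm
        have hAdd : pvAddR (sk ++ rf, rf) nb = (sk ++ (rf ++ [nb]), rf ++ [nb]) := by
          simp [pvAddR, hmm, List.append_assoc]
        have hnac : ¬ na.contains nb = true := fun hc => hna (pv_mem_of_contains hc)
        have h1' : (na ++ [nb]).Nodup := pv_nodup_snoc h1 hna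
        have h2' : (na ++ [nb]).filter (fun z => !sk.contains z) = rf ++ [nb] := by
          rw [List.filter_append, h2]
          simp [hsk]
        simp only [List.foldl_cons, if_neg hnbV, hAdd]
        rw [pv_set_add, if_neg hnac]
        exact ih (na ++ [nb]) (rf ++ [nb]) h1' h2'

theorem pv_sim (g : Int → List Int) (V sk : List Int)
    (hVsk : ∀ x ∈ V, x ∈ sk)
    (hecho : ∀ x ∈ V, ∀ y ∈ g x, y ∈ sk) :
    ∀ (L na rf : List Int), na.Nodup → na.filter (fun z => !sk.contains z) = rf →
      (L.foldl (fun nl node => (g node).foldl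
          (fun nl2 nb => if PySem.Set.contains V nb then nl2 else PySem.Set.add nl2 nb) nl) na).Nodup
      ∧ (L.foldl (fun nl node => (g node).foldl
          (fun nl2 nb => if PySem.Set.contains V nb then nl2 else PySem.Set.add nl2 nb) nl) na).filter
            (fun z => !sk.contains z)
          = ((L.filter (fun z => !V.contains z)).foldl (pvRefNode g) (sk ++ rf, rf)).2
      ∧ ((L.filter (fun z => !V.contains z)).foldl (pvRefNode g) (sk ++ rf, rf)).1
          = sk ++ ((L.filter (fun z => !V.contains z)).foldl (pvRefNode g) (sk ++ rf, rf)).2 := by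
  intro L
  induction L with
  | nil => intro na rf h1 h2; exact ⟨h1, h2, rfl⟩
  | cons x L ihL =>
    intro na rf h1 h2
    by_cases hx : V.contains x = true
    · -- echo node: contributes nothing new; the reference does not process it
      have hxV : x ∈ V := (pv_contains_iff V x).mp hx
      obtain ⟨hnd', hfil'⟩ := pv_echo_fold V sk (g x) na (hecho x hxV) h1
      rw [List.filter_cons_of_neg (by simp [hxV])]
      simp only [List.foldl_cons]
      exact ihL _ rf hnd' (hfil'.trans h2)
    · -- new node: both sides process x
      obtain ⟨hnd', hfil', hFs⟩ := pv_new_fold V sk hVsk (g x) na rf h1 h2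
      have hxnV : x ∉ V := pv_not_mem_of_not_contains hx
      rw [List.filter_cons_of_pos (by simp [hxnV])]
      simp only [List.foldl_cons]
      have hF : pvRefNode g (sk ++ rf, rf) x
          = (sk ++ (pvRefNode g (sk ++ rf, rf) x).2, (pvRefNode g (sk ++ rf, rf) x).2) := by
        rw [Prod.ext_iff]
        exact ⟨hFs, rfl⟩
      rw [hF]
      exact ihL _ ((pvRefNode g (sk ++ rf, rf) x).2) hnd' hfil'

-- Python's set.update on a duplicate-free iterable ---------------------------

theorem pv_update_eq : ∀ (C V : List Int), C.Nodup →
    PySem.Set.update V C = V ++ C.filter (fun z => !V.contains z) := by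
  intro C
  induction C with
  | nil => intro V _; simp [PySem.Set.update]
  | cons x C ih =>
    intro V hnd
    have hndC : C.Nodup := (List.nodup_cons.mp hnd).2
    have hxC : x ∉ C := (List.nodup_cons.mp hnd).1
    have hstep : PySem.Set.update V (x :: C) = PySem.Set.update (PySem.Set.add V x) C := rfl
    by_cases h : V.contains x = true
    · rw [hstep, pv_set_add, if_pos h, ih V hndC]
      rw [List.filter_cons_of_neg (by simp [pv_mem_of_contains h])]
    · rw [hstep, pv_set_add, if_neg h, ih (V ++ [x]) hndC]
      have hfeq : C.filter (fun z => !(V ++ [x]).contains z) = C.filter (fun z => !V.contains z) := by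
        apply List.filter_congr
        intro y hy
        have hyx : y ≠ x := fun he => hxC (he ▸ hy)
        simp [hyx]
      rw [hfeq, List.filter_cons_of_pos (by simp [pv_not_mem_of_not_contains h])]
      simp

-- The A port is the iteration of one A round ---------------------------------

def pvAStep (g : Int → List Int) (st : List Int × List Int) : List Int × List Int :=
  (PySem.Set.update st.1 st.2,
   st.2.foldl
     (fun nl node =>
       (g node).foldl
         (fun nl2 nb => if PySem.Set.contains st.1 nb then nl2 else PySem.Set.add nl2 nb) nl)
     [])

theorem pv_A_eq (entity : Int) (adjacency : List (Int × List Int)) (m : Int) :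
    get_m_hop_neighbors entity adjacency m
      = ((pvAStep (pvAdj adjacency))^[m.toNat] ([], [entity])).1 := by
  have h1 : get_m_hop_neighbors entity adjacency m
      = ((PySem.List.pyRange 0 m 1).foldl (fun st _ => pvAStep (pvAdj adjacency) st)
          ([], [entity])).1 := rfl
  rw [h1, pv_foldl_const]
  norm_num [PySem.List.length_pyRange_one]

theorem pv_A_inv (g : Int → List Int) (e : Int) : ∀ n : ℕ,
    ((pvAStep g)^[n + 1] ([], [e])).1 = (pvRef g e n).1
    ∧ ((pvAStep g)^[n + 1] ([], [e])).2.Nodup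
    ∧ ((pvAStep g)^[n + 1] ([], [e])).2.filter (fun z => !((pvRef g e n).1.contains z))
        = (pvRef g e (n + 1)).2
    ∧ (∀ x ∈ ((pvAStep g)^[n + 1] ([], [e])).2, x ∈ (pvRef g e (n + 1)).1) := by
  intro n
  induction n with
  | zero =>
    have hit : (pvAStep g)^[0 + 1] (([] : List Int), [e]) = pvAStep g ([], [e]) := rfl
    have hsim := pv_sim g [] [e] (by simp) (by simp) [e] [] [] List.nodup_nil (by simp)
    have hfe : ([e].filter (fun z => !([] : List Int).contains z)) = [e] := by simp
    rw [hfe] at hsim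
    have hstart : (([e] : List Int) ++ ([] : List Int), ([] : List Int))
        = (([e] : List Int), ([] : List Int)) := by simp
    rw [hstart] at hsim
    obtain ⟨s1, s2, _⟩ := hsim
    have href1 : pvRef g e (0 + 1) = [e].foldl (pvRefNode g) ([e], []) := by
      rw [pv_ref_succ]; rfl
    have hupd : PySem.Set.update ([] : List Int) [e] = [e] := rfl
    refine ⟨?_, ?_, ?_, ?_⟩
    · rw [hit]; exact hupd
    · rw [hit]; exact s1
    · rw [hit, href1]; exact s2
    · rw [hit]
      intro x hx
      have hfeq : (pvAStep g (([] : List Int), [e])).2.filter (fun z => !([e] : List Int).contains z)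
          = (pvRef g e (0 + 1)).2 := by rw [href1]; exact s2
      have hx' := pv_mem_of_filter_eq hfeq x hx
      rcases hx' with h | h
      · exact pv_ref_mono_succ g e 0 x (by simpa [pv_ref_zero] using h)
      · exact pv_ref_front_sub g e (0 + 1) x h
  | succ n ihn =>
    obtain ⟨hV, hnd, hfil, _⟩ := ihn
    have hit : (pvAStep g)^[n + 1 + 1] (([] : List Int), [e])
        = pvAStep g ((pvAStep g)^[n + 1] ([], [e])) := Function.iterate_succ_apply' _ _ _
    set st := (pvAStep g)^[n + 1] (([] : List Int), [e]) with hst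
    have hVsk : ∀ x ∈ st.1, x ∈ (pvRef g e (n + 1)).1 := by
      rw [hV]; exact pv_ref_mono_succ g e n
    have hecho : ∀ x ∈ st.1, ∀ y ∈ g x, y ∈ (pvRef g e (n + 1)).1 := by
      rw [hV]; exact pv_ref_adj g e n
    have hsim := pv_sim g st.1 ((pvRef g e (n + 1)).1) hVsk hecho st.2 [] [] List.nodup_nil (by simp)
    have hstart : ((pvRef g e (n + 1)).1 ++ ([] : List Int), ([] : List Int))
        = ((pvRef g e (n + 1)).1, ([] : List Int)) := by simp
    rw [hstart] at hsim
    have hfV : st.2.filter (fun z => !st.1.contains z) = (pvRef g e (n + 1)).2 := by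
      rw [hV]; exact hfil
    rw [hfV] at hsim
    obtain ⟨s1, s2, _⟩ := hsim
    have href : pvRef g e (n + 1 + 1)
        = (pvRef g e (n + 1)).2.foldl (pvRefNode g) ((pvRef g e (n + 1)).1, []) := by
      rw [pv_ref_succ]; rfl
    have hupd : PySem.Set.update st.1 st.2 = (pvRef g e (n + 1)).1 := by
      rw [pv_update_eq st.2 st.1 hnd, hfV, hV, ← pv_ref_seen_succ]
    refine ⟨?_, ?_, ?_, ?_⟩
    · rw [hit]; exact hupd
    · rw [hit]; exact s1
    · rw [hit, href]; exact s2
    · rw [hit]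
      intro x hx
      have hfeq : (pvAStep g st).2.filter (fun z => !((pvRef g e (n + 1)).1.contains z))
          = (pvRef g e (n + 1 + 1)).2 := by rw [href]; exact s2
      have hx' := pv_mem_of_filter_eq hfeq x hx
      rcases hx' with h | h
      · exact pv_ref_mono_succ g e (n + 1) x h
      · exact pv_ref_front_sub g e (n + 1 + 1) x h

-- The B port follows the same reference levels --------------------------------

theorem pvBfsLoop_zero (adjacency : List (Int × List Int)) (m : Int)
    (q : List (Int × Int)) (seen : List Int) :
    pvBfsLoop adjacency m 0 q seen = seen := rfl

theorem pvBfsLoop_nil (adjacency : List (Int × List Int)) (m : Int) (fuel : ℕ) (seen : List Int) :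
    pvBfsLoop adjacency m (fuel + 1) [] seen = seen := rfl

theorem pvBfsLoop_cons (adjacency : List (Int × List Int)) (m : Int) (fuel : ℕ)
    (node d : Int) (rest : List (Int × Int)) (seen : List Int) :
    pvBfsLoop adjacency m (fuel + 1) ((node, d) :: rest) seen
      = if d < m - 1 then
          pvBfsLoop adjacency m fuel
            (rest ++ ((pvAdj adjacency node).foldl
              (fun (p : PySem.Set Int × List (Int × Int)) nb =>
                if PySem.Set.contains p.1 nb then p else (PySem.Set.add p.1 nb, p.2 ++ [(nb, d + 1)]))
              (seen, [])).2)
            ((pvAdj adjacency node).foldl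
              (fun (p : PySem.Set Int × List (Int × Int)) nb =>
                if PySem.Set.contains p.1 nb then p else (PySem.Set.add p.1 nb, p.2 ++ [(nb, d + 1)]))
              (seen, [])).1
        else pvBfsLoop adjacency m fuel rest seen := rfl

theorem pv_adj_sub (adjacency : List (Int × List Int)) (x y : Int)
    (h : y ∈ pvAdj adjacency x) : ∃ p ∈ adjacency, y ∈ p.2 := by
  unfold pvAdj PySem.Dict.getD PySem.Dict.get? at h
  cases hf : List.find? (fun p => p.1 == x) ((PySem.Dict.mk adjacency).items) with
  | none => rw [hf] at h; simp at h
  | some p =>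
    rw [hf] at h
    simp only [Option.map_some, Option.getD_some] at h
    exact ⟨p, List.mem_of_find?_eq_some hf, h⟩

theorem pv_mem_W (entity : Int) (adjacency : List (Int × List Int)) (x y : Int)
    (h : y ∈ pvAdj adjacency x) : y ∈ pvW entity adjacency := by
  obtain ⟨p, hp, hyp⟩ := pv_adj_sub adjacency x y h
  unfold pvW
  rw [PySem.List.mem_dedup]
  exact List.mem_cons_of_mem _ (List.mem_flatMap.mpr ⟨p, hp, hyp⟩)

theorem pv_e_mem_W (entity : Int) (adjacency : List (Int × List Int)) :
    entity ∈ pvW entity adjacency := by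
  unfold pvW
  rw [PySem.List.mem_dedup]
  exact List.mem_cons_self ..

def pvBInv (adjacency : List (Int × List Int)) (e m : Int) (k : ℕ) (R P seen : List Int) : Prop :=
  ((k : Int) < m - 1 ∧ ∃ D : List Int,
      (pvRef (pvAdj adjacency) e k).2 = D ++ R ∧
      (seen, P) = D.foldl (pvRefNode (pvAdj adjacency)) ((pvRef (pvAdj adjacency) e k).1, []))
  ∨ ((k : Int) = m - 1 ∧ (∃ D : List Int, (pvRef (pvAdj adjacency) e k).2 = D ++ R) ∧ P = [] ∧
      seen = (pvRef (pvAdj adjacency) e k).1)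

theorem pv_pair_fold (tag : Int) : ∀ (ns s t : List Int),
    ns.foldl
      (fun (p : PySem.Set Int × List (Int × Int)) nb =>
        if PySem.Set.contains p.1 nb then p else (PySem.Set.add p.1 nb, p.2 ++ [(nb, tag)]))
      (s, t.map (fun z => (z, tag)))
    = ((ns.foldl pvAddR (s, t)).1, ((ns.foldl pvAddR (s, t)).2).map (fun z => (z, tag))) := by
  intro ns
  induction ns with
  | nil => intro s t; simp
  | cons nb ns ih =>
    intro s t
    by_cases h : nb ∈ s
    · have hL : (if PySem.Set.contains (s, t.map (fun z => (z, tag))).1 nb = true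
          then (s, t.map (fun z => (z, tag)))
          else (PySem.Set.add (s, t.map (fun z => (z, tag))).1 nb,
                (s, t.map (fun z => (z, tag))).2 ++ [(nb, tag)]))
          = (s, t.map (fun z => (z, tag))) := by
        simp [pv_set_contains, h]
      have hR : pvAddR (s, t) nb = (s, t) := by simp [pvAddR, h]

      simp only [List.foldl_cons]
      rw [hL, hR]
      exact ih s t
    · have hadd : PySem.Set.add s nb = s ++ [nb] := by simp [pv_set_add, h]
      have hL : (if PySem.Set.contains (s, t.map (fun z => (z, tag))).1 nb = true
          then (s, t.map (fun z => (z, tag)))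
          else (PySem.Set.add (s, t.map (fun z => (z, tag))).1 nb,
                (s, t.map (fun z => (z, tag))).2 ++ [(nb, tag)]))
          = (s ++ [nb], (t ++ [nb]).map (fun z => (z, tag))) := by
        simp [pv_set_contains, h, hadd]
      have hR : pvAddR (s, t) nb = (s ++ [nb], t ++ [nb]) := by simp [pvAddR, h]

      simp only [List.foldl_cons]
      rw [hL, hR]
      exact ih (s ++ [nb]) (t ++ [nb])

theorem pv_bfs_done (adjacency : List (Int × List Int)) (e m : Int) (k : ℕ) (seen : List Int)
    (hinv : pvBInv adjacency e m k [] [] seen) :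
    seen = (pvRef (pvAdj adjacency) e (m.toNat - 1)).1 := by
  rcases hinv with ⟨hk, D, hD, hpair⟩ | ⟨hk, _, _, hseen⟩
  · have hDfull : (pvRef (pvAdj adjacency) e k).2 = D := by simpa using hD
    have hstep : pvRef (pvAdj adjacency) e (k + 1) = (seen, []) := by
      rw [pv_ref_succ]
      unfold pvRefStep
      rw [hDfull, ← hpair]
    have hstab := pv_ref_stab (pvAdj adjacency) e (k + 1) (by rw [hstep]) (m.toNat - 1 - (k + 1))
    have harith : (k + 1) + (m.toNat - 1 - (k + 1)) = m.toNat - 1 := by omega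
    rw [harith] at hstab
    rw [hstab, hstep]
  · have hkk : m.toNat - 1 = k := by omega
    rw [hkk, hseen]

theorem pv_bfs_pop (adjacency : List (Int × List Int)) (e m : Int) (f : ℕ)
    (ih : ∀ (k : ℕ) (R P seen : List Int), seen.Nodup → (∀ y ∈ seen, y ∈ pvW e adjacency) →
      R.length + P.length + ((pvW e adjacency).length - seen.length) ≤ f →
      pvBInv adjacency e m k R P seen →
      pvBfsLoop adjacency m f
          (R.map (fun z => (z, (k : Int))) ++ P.map (fun z => (z, (k : Int) + 1))) seen
        = (pvRef (pvAdj adjacency) e (m.toNat - 1)).1) :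
    ∀ (k : ℕ) (x : Int) (R P seen : List Int), seen.Nodup → (∀ y ∈ seen, y ∈ pvW e adjacency) →
      (x :: R).length + P.length + ((pvW e adjacency).length - seen.length) ≤ f + 1 →
      pvBInv adjacency e m k (x :: R) P seen →
      pvBfsLoop adjacency m (f + 1)
          ((x :: R).map (fun z => (z, (k : Int))) ++ P.map (fun z => (z, (k : Int) + 1))) seen
        = (pvRef (pvAdj adjacency) e (m.toNat - 1)).1 := by
  intro k x R P seen hnd hsub hfuel hinv
  have hqueue : (x :: R).map (fun z => (z, (k : Int))) ++ P.map (fun z => (z, (k : Int) + 1))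
      = (x, (k : Int)) :: (R.map (fun z => (z, (k : Int))) ++ P.map (fun z => (z, (k : Int) + 1))) := by
    simp
  rw [hqueue, pvBfsLoop_cons]
  rcases hinv with ⟨hk, D, hD, hpair⟩ | ⟨hk, ⟨D, hD⟩, hP, hseen⟩
  · -- below the last level: expand x
    rw [if_pos hk]
    have hfold := pv_pair_fold ((k : Int) + 1) (pvAdj adjacency x) seen []
    simp only [List.map_nil] at hfold
    rw [hfold]
    obtain ⟨T, hT1, hT2, hT3, _⟩ := pv_addR_spec (pvAdj adjacency x) seen
    rw [hT1]
    have hnd' : (seen ++ T).Nodup := hT3 hnd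
    have hsub' : ∀ y ∈ seen ++ T, y ∈ pvW e adjacency := by
      intro y hy
      rcases List.mem_append.mp hy with h | h
      · exact hsub y h
      · exact pv_mem_W e adjacency x y (hT2 y h)
    have hq : (R.map (fun z => (z, (k : Int))) ++ P.map (fun z => (z, (k : Int) + 1)))
          ++ T.map (fun z => (z, (k : Int) + 1))
        = R.map (fun z => (z, (k : Int))) ++ (P ++ T).map (fun z => (z, (k : Int) + 1)) := by
      simp
    rw [hq]
    have hlen : (seen ++ T).length ≤ (pvW e adjacency).length :=
      (List.Nodup.subperm hnd' (by intro y hy; exact hsub' y hy)).length_le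
    have hpair' : (D ++ [x]).foldl (pvRefNode (pvAdj adjacency))
        ((pvRef (pvAdj adjacency) e k).1, []) = (seen ++ T, P ++ T) := by
      rw [List.foldl_append, ← hpair]
      simp only [List.foldl_cons, List.foldl_nil]
      unfold pvRefNode
      rw [pv_addR_shift (pvAdj adjacency x) seen P, hT1]
    apply ih k R (P ++ T) (seen ++ T) hnd' hsub'
    · simp only [List.length_append] at hlen
      simp only [List.length_cons, List.length_append] at hfuel ⊢
      omega
    · left
      exact ⟨hk, D ++ [x], by rw [hD]; simp, hpair'.symm⟩
  · -- last level: x is dropped without being expanded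
    rw [if_neg (by omega)]
    subst hP
    apply ih k R [] seen hnd hsub
    · simp only [List.length_cons, List.length_nil] at hfuel ⊢
      omega
    · right
      exact ⟨hk, ⟨D ++ [x], by rw [hD]; simp⟩, rfl, hseen⟩

theorem pv_bfs_main (adjacency : List (Int × List Int)) (e m : Int) :
    ∀ (fuel : ℕ) (k : ℕ) (R P seen : List Int), seen.Nodup →
      (∀ y ∈ seen, y ∈ pvW e adjacency) →
      R.length + P.length + ((pvW e adjacency).length - seen.length) ≤ fuel →
      pvBInv adjacency e m k R P seen →
      pvBfsLoop adjacency m fuel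
          (R.map (fun z => (z, (k : Int))) ++ P.map (fun z => (z, (k : Int) + 1))) seen
        = (pvRef (pvAdj adjacency) e (m.toNat - 1)).1 := by
  intro fuel
  induction fuel with
  | zero =>
    intro k R P seen hnd hsub hfuel hinv
    have hR : R = [] := by
      have : R.length = 0 := by omega
      exact List.eq_nil_of_length_eq_zero this
    have hP : P = [] := by
      have : P.length = 0 := by omega
      exact List.eq_nil_of_length_eq_zero this
    subst hR; subst hP
    simp only [List.map_nil, List.append_nil]
    rw [pvBfsLoop_zero]
    exact pv_bfs_done adjacency e m k seen hinv
  | succ f ihf =>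
    intro k R P seen hnd hsub hfuel hinv
    rcases R with _ | ⟨x, R'⟩
    · rcases P with _ | ⟨p, P'⟩
      · simp only [List.map_nil, List.append_nil]
        rw [pvBfsLoop_nil]
        exact pv_bfs_done adjacency e m k seen hinv
      · rcases hinv with ⟨hk, D, hD, hpair⟩ | ⟨_, _, hP, _⟩
        · have hDfull : (pvRef (pvAdj adjacency) e k).2 = D := by simpa using hD
          have hfront : pvRef (pvAdj adjacency) e (k + 1) = (seen, p :: P') := by
            rw [pv_ref_succ]
            unfold pvRefStep
            rw [hDfull, ← hpair]
          have hinv' : pvBInv adjacency e m (k + 1) (p :: P') [] seen := by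
            by_cases h2 : ((k + 1 : ℕ) : Int) < m - 1
            · left
              refine ⟨h2, [], ?_, ?_⟩
              · simp [hfront]
              · simp [hfront]
            · right
              refine ⟨by push_cast at h2 ⊢; omega, ⟨[], by simp [hfront]⟩, rfl, by rw [hfront]⟩
          have hgoal := pv_bfs_pop adjacency e m f ihf (k + 1) p P' [] seen hnd hsub
            (by simp only [List.length_cons, List.length_nil] at hfuel ⊢; omega) hinv'
          have hq : ((p :: P').map (fun z => (z, ((k + 1 : ℕ) : Int)))
                ++ ([] : List Int).map (fun z => (z, ((k + 1 : ℕ) : Int) + 1)))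
              = ([] : List Int).map (fun z => (z, (k : Int)))
                ++ (p :: P').map (fun z => (z, (k : Int) + 1)) := by
            push_cast
            simp
          rw [hq] at hgoal
          exact hgoal
        · exact absurd hP (by simp)
    · exact pv_bfs_pop adjacency e m f ihf k x R' P seen hnd hsub hfuel hinv

theorem pv_B_eq (entity : Int) (adjacency : List (Int × List Int)) (m : Int) (hm : 1 ≤ m) :
    get_m_hop_neighbors_alt entity adjacency m
      = (pvRef (pvAdj adjacency) entity (m.toNat - 1)).1 := by
  have h0 : get_m_hop_neighbors_alt entity adjacency m
      = pvBfsLoop adjacency m (pvW entity adjacency).length [(entity, 0)] [entity] := by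
    unfold get_m_hop_neighbors_alt
    rw [if_neg (by omega)]
    rfl
  rw [h0]
  have hW1 : 1 ≤ (pvW entity adjacency).length :=
    List.length_pos_of_mem (pv_e_mem_W entity adjacency)
  have hinv : pvBInv adjacency entity m 0 [entity] [] [entity] := by
    by_cases h2 : ((0 : ℕ) : Int) < m - 1
    · left
      exact ⟨h2, [], by simp [pv_ref_zero], by simp [pv_ref_zero]⟩
    · right
      refine ⟨by push_cast at h2 ⊢; omega, ⟨[], by simp [pv_ref_zero]⟩, rfl, by simp [pv_ref_zero]⟩
  have hmain := pv_bfs_main adjacency entity m (pvW entity adjacency).length 0 [entity] [] [entity]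
    (by simp)
    (by intro y hy; rw [List.mem_singleton] at hy; rw [hy]; exact pv_e_mem_W entity adjacency)
    (by simp only [List.length_cons, List.length_nil]; omega)
    hinv
  simpa using hmain

-- ===== VERDICT (by name: the statement is the Claim_ definition above) =====
theorem get_m_hop_neighbors_spec : Claim_equal_get_m_hop_neighbors := by
  intro entity adjacency m _hdom _hpre
  unfold Spec_get_m_hop_neighbors
  by_cases hm : m ≤ 0
  · rw [pv_A_eq]
    have h0 : m.toNat = 0 := Int.toNat_of_nonpos hm
    rw [h0]
    simp [get_m_hop_neighbors_alt, hm]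
  · have h1 : 1 ≤ m := by omega
    rw [pv_A_eq, pv_B_eq entity adjacency m h1]
    have hiter : m.toNat = (m.toNat - 1) + 1 := by omega
    rw [hiter]
    exact (pv_A_inv (pvAdj adjacency) entity (m.toNat - 1)).1
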